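-- pv_equiv track=rewrite | github.com/BrunaReveriego/FaculdadeImpacta | POO/AC1/numeros.py | eh_quase_armstrong
-- ===== SOURCE A (Python) =====
-- def eh_quase_armstrong(n):
--     """Função que verifica se um número é quase de Armstrong
--
--     Recebe um número natural n, com n >= 0, e retorna
--     verdadeiro se n atende aos seguintes critérios:
--
--     1) não ser um número de Armstrong;
--     2) o resultado da soma de seus digitos elevados ao número total
--        de digitos é igual a ele próprio somado ou subtraído de 1.
--
--     Exemplos
--     --------
--     35 é quase um número de Armstrong:
--         3**2 + 5**2 = 9 + 25 = 34
--     75 é quase um número de Armstrong: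
--         7**2 + 5**2 = 49 + 25 = 74
--
--     Parâmetros
--     ----------
--     n : int
--         Número natural a ser testado.
--
--     Retorno
--     -------
--     bool
--         True se n for um número quase de Armstrong e False caso contrário.
--     """
--
--     stringn = str(n)
--     tamanho_num = len(stringn)
--     x = 0
--     y = 0
--     cont = 0
--     soma = 0
--     verifica = False
--
--     while x < tamanho_num :
--         cont = cont+1
--         x=x+1
--
--     while y < tamanho_num:
--         soma = soma + ((int(stringn[y])) ** cont)
--         y = y + 1
--
--     if soma+1 == n:
--         verifica = True
--
--     return verifica
--
--     pass
-- ===== SOURCE B (Python) =====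
-- def eh_quase_armstrong(n):
--     d = 1
--     m = n // 10
--     while m > 0:
--         d += 1
--         m //= 10
--     soma = 0
--     m = n
--     while m > 0:
--         soma += (m % 10) ** d
--         m //= 10
--     return soma + 1 == n
-- ===== Notes on version B (the rewrite author's own statement) =====
-- stated objective: alternative
-- what changed: B replaces A's str(n) conversion, manual counting loop and per-character int() parsing by two pure integer loops (digit count via repeated //10, then digit-power sum via %10 and //10) and a single comparison soma+1==n.
-- crash fix: On n < 0, A raises ValueError (int('-') on the sign character of str(n)); B's while-m>0 loops do not run and it returns False. — e.g. on eh_quase_armstrong(-5): A raises ValueError, B returns false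
import Mathlib
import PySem

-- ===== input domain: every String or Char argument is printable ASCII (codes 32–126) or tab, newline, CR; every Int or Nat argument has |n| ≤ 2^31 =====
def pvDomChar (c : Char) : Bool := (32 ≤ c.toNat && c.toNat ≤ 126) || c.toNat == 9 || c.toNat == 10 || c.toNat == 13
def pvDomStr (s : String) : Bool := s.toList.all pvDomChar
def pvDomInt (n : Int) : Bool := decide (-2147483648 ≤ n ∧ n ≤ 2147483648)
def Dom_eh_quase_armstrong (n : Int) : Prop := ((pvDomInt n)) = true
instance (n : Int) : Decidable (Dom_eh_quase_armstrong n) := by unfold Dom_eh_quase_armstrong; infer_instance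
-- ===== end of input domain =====

-- B replaces A's string-of-digits loops by pure integer arithmetic (% 10 / // 10 loops); objective: alternative.

-- ===== PORT A =====
def eh_quase_armstrong (n : Int) : Bool :=
  let stringn := PySem.Int.toChars n
  let tamanho_num : Int := PySem.List.len stringn
  -- while x < tamanho_num: cont = cont + 1
  let cont : Int := (PySem.List.pyRange 0 tamanho_num 1).foldl (fun c _ => c + 1) 0
  -- while y < tamanho_num: soma = soma + int(stringn[y]) ** cont
  let soma : Int := (PySem.List.pyRange 0 tamanho_num 1).foldl
    (fun s y => s + ((PySem.Int.ofChars? [PySem.List.pyGetD stringn y ' ']).getD 0) ^ cont.toNat) 0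
  decide (soma + 1 = n)

-- ===== PORT B =====
-- while m > 0: d += 1; m //= 10
def pvCountLoop (m : Int) (d : Int) : Int :=
  if 0 < m then pvCountLoop (PySem.Int.floordiv m 10) (d + 1) else d
termination_by m.toNat
decreasing_by
  simp only [PySem.Int.floordiv_eq_ediv_of_pos (by norm_num : (0:Int) < 10)]
  omega

-- while m > 0: soma += (m % 10) ** d; m //= 10
def pvSumLoop (m : Int) (d : Nat) (soma : Int) : Int :=
  if 0 < m then pvSumLoop (PySem.Int.floordiv m 10) d (soma + PySem.Int.mod m 10 ^ d) else soma
termination_by m.toNat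
decreasing_by
  simp only [PySem.Int.floordiv_eq_ediv_of_pos (by norm_num : (0:Int) < 10)]
  omega

def eh_quase_armstrong_alt (n : Int) : Bool :=
  let d := pvCountLoop (PySem.Int.floordiv n 10) 1
  let soma := pvSumLoop n d.toNat 0
  decide (soma + 1 = n)

-- ===== PRECONDITION & SPEC =====
-- Pre_ excludes negative n: str(n) then starts with '-' and A raises ValueError at int(stringn[0]).
def Pre_eh_quase_armstrong (n : Int) : Prop := 0 ≤ n
instance (n : Int) : Decidable (Pre_eh_quase_armstrong n) := by unfold Pre_eh_quase_armstrong; infer_instance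
def pvWitness_eh_quase_armstrong : Int := 35

-- On n < 0 A raises ValueError (int('-')) while B's arithmetic loops simply do not run and it returns False.
def Raises_eh_quase_armstrong (n : Int) : Prop := n < 0
instance (n : Int) : Decidable (Raises_eh_quase_armstrong n) := by unfold Raises_eh_quase_armstrong; infer_instance
def pvRaiseWitness_eh_quase_armstrong : Int := -5
def pvRaiseWitnessOut_eh_quase_armstrong : Bool := false

def Spec_eh_quase_armstrong (n : Int) (out : Bool) : Prop := out = eh_quase_armstrong_alt n
instance (n : Int) (out : Bool) : Decidable (Spec_eh_quase_armstrong n out) := by unfold Spec_eh_quase_armstrong; infer_instance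

-- ===== CLAIM (what is proved, stated in full; the proofs are below) =====
def Claim_equal_eh_quase_armstrong : Prop := ∀ (n : Int), Dom_eh_quase_armstrong n → Pre_eh_quase_armstrong n → Spec_eh_quase_armstrong n (eh_quase_armstrong n)
def Claim_raises_eh_quase_armstrong : Prop := (∀ (n : Int), Dom_eh_quase_armstrong n → Raises_eh_quase_armstrong n → ¬ Pre_eh_quase_armstrong n) ∧ (Dom_eh_quase_armstrong (pvRaiseWitness_eh_quase_armstrong) ∧ Raises_eh_quase_armstrong (pvRaiseWitness_eh_quase_armstrong) ∧ eh_quase_armstrong_alt (pvRaiseWitness_eh_quase_armstrong) = pvRaiseWitnessOut_eh_quase_armstrong)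

-- ===== LEMMAS AND PROOFS =====

-- counting loop of A: adds the list length
theorem foldl_count_one (l : List Int) (c : Int) :
    l.foldl (fun c _ => c + 1) c = c + l.length := by
  induction l generalizing c with
  | nil => simp
  | cons x xs ih => simp [List.foldl, ih]; omega

-- the character printed for a decimal digit parses back to that digit
theorem ofChars_digitChar (d : Nat) (hd : d < 10) :
    (PySem.Int.ofChars? [Nat.digitChar d]).getD 0 = (d : Int) := by
  interval_cases d <;> decide

-- core printer characterization
theorem toDigitsCore_eq (fuel : Nat) : ∀ (n : Nat) (ds : List Char), 0 < n → n < fuel →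
    Nat.toDigitsCore 10 fuel n ds = ((Nat.digits 10 n).map Nat.digitChar).reverse ++ ds := by
  induction fuel with
  | zero => intro n ds h hf; omega
  | succ fuel ih =>
    intro n ds h hf
    rw [show Nat.toDigitsCore 10 (fuel + 1) n ds
        = if n / 10 = 0 then Nat.digitChar (n % 10) :: ds
          else Nat.toDigitsCore 10 fuel (n / 10) (Nat.digitChar (n % 10) :: ds) from rfl]
    by_cases h10 : n / 10 = 0
    · have hn10 : n < 10 := by omega
      rw [if_pos h10, Nat.digits_def' (by norm_num) h, Nat.digits_eq_nil_iff_eq_zero.mpr h10]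
      simp [Nat.mod_eq_of_lt hn10]
    · rw [if_neg h10, ih (n / 10) _ (by omega) (by omega),
        Nat.digits_def' (by norm_num : 1 < 10) h]
      simp

theorem toDigits_pos (n : Nat) (h : 0 < n) :
    Nat.toDigits 10 n = ((Nat.digits 10 n).map Nat.digitChar).reverse := by
  rw [Nat.toDigits, toDigitsCore_eq (n + 1) n [] h (by omega)]
  simp

theorem toDigits_zero : Nat.toDigits 10 0 = ['0'] := rfl

-- length of the printed string = 1 + digit count of n / 10
theorem toDigits_length (n : Nat) :
    (Nat.toDigits 10 n).length = 1 + (Nat.digits 10 (n / 10)).length := by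
  rcases Nat.eq_zero_or_pos n with h | h
  · subst h; simp
  · rw [toDigits_pos n h]
    simp [Nat.digits_def' (by norm_num : 1 < 10) h]
    omega

-- B's digit-count loop
theorem pvCountLoop_eq (m : Nat) : ∀ (d : Int),
    pvCountLoop (m : Int) d = d + (Nat.digits 10 m).length := by
  induction m using Nat.strong_induction_on with
  | _ m ih =>
    intro d
    rw [pvCountLoop]
    rcases Nat.eq_zero_or_pos m with h | h
    · subst h; simp
    · rw [if_pos (by exact_mod_cast h),
        (by norm_num : (10 : Int) = ((10 : Nat) : Int)), PySem.Int.floordiv_natCast m 10,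
        ih (m / 10) (Nat.div_lt_self h (by norm_num)) (d + 1),
        Nat.digits_def' (by norm_num : 1 < 10) h]
      simp
      omega

-- B's power-sum loop
theorem pvSumLoop_eq (m : Nat) : ∀ (e : Nat) (s : Int),
    pvSumLoop (m : Int) e s = s + ((((Nat.digits 10 m).map (· ^ e)).sum : Nat) : Int) := by
  induction m using Nat.strong_induction_on with
  | _ m ih =>
    intro e s
    rw [pvSumLoop]
    rcases Nat.eq_zero_or_pos m with h | h
    · subst h; simp
    · rw [if_pos (by exact_mod_cast h),
        (by norm_num : (10 : Int) = ((10 : Nat) : Int)), PySem.Int.floordiv_natCast m 10,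
        PySem.Int.mod_natCast m 10,
        ih (m / 10) (Nat.div_lt_self h (by norm_num)) e _,
        Nat.digits_def' (by norm_num : 1 < 10) h]
      simp only [List.map_cons, List.sum_cons]
      push_cast
      ring

-- A's digit-power sum over the printed string, as a sum over Nat.digits
theorem somaA_eq (n : Nat) (e : Nat) (he : 0 < e) :
    (Nat.toDigits 10 n).foldl
      (fun s c => s + ((PySem.Int.ofChars? [c]).getD 0) ^ e) 0
    = ((((Nat.digits 10 n).map (· ^ e)).sum : Nat) : Int) := by
  rw [PySem.List.foldl_add _ (fun c => ((PySem.Int.ofChars? [c]).getD 0) ^ e) 0]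
  rcases Nat.eq_zero_or_pos n with h | h
  · subst h
    rw [toDigits_zero]
    have h0 : (PySem.Int.ofChars? ['0']).getD 0 = (0 : Int) := by decide
    simp [h0, zero_pow (Nat.pos_iff_ne_zero.mp he)]  -- single '0' contributes 0^e = 0
  · rw [toDigits_pos n h, List.map_reverse, List.map_map, List.sum_reverse]
    have hmap : (Nat.digits 10 n).map ((fun c => ((PySem.Int.ofChars? [c]).getD 0) ^ e) ∘ Nat.digitChar)
        = (Nat.digits 10 n).map (fun k => ((k ^ e : Nat) : Int)) := by
      apply List.map_congr_left
      intro k hk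
      have hk10 : k < 10 := Nat.digits_lt_base (by norm_num) hk
      simp [Function.comp, ofChars_digitChar k hk10]
    rw [hmap]
    push_cast
    have hcast : List.map (fun k : Nat => ((k : Int)) ^ e) (Nat.digits 10 n)
        = List.map (Nat.cast ∘ fun x => x ^ e) (Nat.digits 10 n) :=
      List.map_congr_left (fun k _ => by rw [Function.comp_apply, Nat.cast_pow])
    rw [hcast, ← List.map_map]
    simp

-- ===== VERDICT (by name: the statement is the Claim_ definition above) =====
theorem eh_quase_armstrong_spec : Claim_equal_eh_quase_armstrong := by
  unfold Claim_equal_eh_quase_armstrong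
  intro n _ hpre
  unfold Spec_eh_quase_armstrong
  obtain ⟨N, rfl⟩ : ∃ N : Nat, n = (N : Int) := ⟨n.toNat, (Int.toNat_of_nonneg hpre).symm⟩
  unfold eh_quase_armstrong eh_quase_armstrong_alt
  have htc : PySem.Int.toChars (N : Int) = Nat.toDigits 10 N := by
    unfold PySem.Int.toChars
    rw [if_neg (by omega)]
    simp
  simp only [htc, PySem.List.len_eq]
  have hLpos : 0 < (Nat.toDigits 10 N).length := by
    rw [toDigits_length]; omega
  -- A's cont loop computes the length of the printed string
  have hcont : (List.foldl (fun c _ => c + 1) (0 : Int)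
      (PySem.List.pyRange 0 ((Nat.toDigits 10 N).length : Int) 1)).toNat
      = (Nat.toDigits 10 N).length := by
    rw [foldl_count_one, PySem.List.length_pyRange_one]; omega
  rw [hcont]
  rw [PySem.List.foldl_pyRange_zero_pyGetD' (Nat.toDigits 10 N) ' '
      (fun s c => s + ((PySem.Int.ofChars? [c]).getD 0) ^ (Nat.toDigits 10 N).length) 0]
  rw [somaA_eq N (Nat.toDigits 10 N).length hLpos]
  -- B's side
  rw [(by norm_num : (10 : Int) = ((10 : Nat) : Int)), PySem.Int.floordiv_natCast N 10,
    pvCountLoop_eq (N / 10) 1]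
  have hd : ((1 : Int) + ((Nat.digits 10 (N / 10)).length : Int)).toNat
      = (Nat.toDigits 10 N).length := by
    rw [toDigits_length]; omega
  rw [hd, pvSumLoop_eq N (Nat.toDigits 10 N).length 0]
  simp

@[simp] theorem eh_quase_armstrong_raises : Claim_raises_eh_quase_armstrong := by
  unfold Claim_raises_eh_quase_armstrong
  constructor
  · intro n _ hr hp
    exact absurd hp (by unfold Pre_eh_quase_armstrong Raises_eh_quase_armstrong at *; omega)
  · refine ⟨by decide, by decide, ?_⟩
    show eh_quase_armstrong_alt (-5) = false
    unfold eh_quase_armstrong_alt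
    rw [show PySem.Int.floordiv (-5) 10 = -1 by decide]
    rw [pvCountLoop]
    norm_num
    rw [pvSumLoop]
    norm_num
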